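-- pv_equiv track=rewrite | github.com/ourhouchmohamed97/CTF-Playground | solve_keyforge.py | check_40574a
-- ===== SOURCE A (Python) =====
-- TARGET_40574A = 0x61227b3b      # Complex arithmetic
--
-- def check_40574a(data):
--     """
--     Complex arithmetic on bytes 19-24 (6 bytes)
--     Algorithm:
--       sum = 0
--       product = 1
--       xor_val = 0
--       for each byte:
--           sum += byte
--           product = (product * byte) % 0xFFFF
--           xor_val ^= byte
--       result = ((sum + product) ^ xor_val) + 0x5555
--       return result == TARGET_40574A
--     """
--     sum_val = 0
--     product = 1
--     xor_val = 0
--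
--     for byte in data:
--         sum_val += byte
--         product = (product * byte) % 0xFFFF
--         xor_val ^= byte
--
--     result = ((sum_val + product) ^ xor_val) + 0x5555
--     return result == TARGET_40574A
-- ===== SOURCE B (Python) =====
-- TARGET_40574A = 0x61227b3b      # Complex arithmetic
--
-- def check_40574a(data):
--     # Divide-and-conquer reduction: each of sum, modular product and xor is
--     # associative-commutative, so the triple can be combined over a binary split
--     # of the data instead of a linear left-to-right loop.
--     def reduce3(seg):
--         if len(seg) == 1:
--             b = seg[0]
--             return (b, b % 0xFFFF, b)
--         mid = len(seg) // 2
--         s1, p1, x1 = reduce3(seg[:mid])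
--         s2, p2, x2 = reduce3(seg[mid:])
--         return (s1 + s2, p1 * p2 % 0xFFFF, x1 ^ x2)
--
--     s, p, x = reduce3(data) if data else (0, 1, 0)
--     return (s + p) ^ x == TARGET_40574A - 0x5555
-- ===== Notes on version B (the rewrite author's own statement) =====
-- stated objective: alternative
-- what changed: Replaces the linear fused accumulator loop with a divide-and-conquer binary-split reduction that recursively combines (sum, product mod 0xFFFF, xor) of the two halves, and compares against the pre-shifted constant TARGET-0x5555; correct because all three combiners are associative and commutative and per-step modular reduction equals mod at each merge.
import Mathlib
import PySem

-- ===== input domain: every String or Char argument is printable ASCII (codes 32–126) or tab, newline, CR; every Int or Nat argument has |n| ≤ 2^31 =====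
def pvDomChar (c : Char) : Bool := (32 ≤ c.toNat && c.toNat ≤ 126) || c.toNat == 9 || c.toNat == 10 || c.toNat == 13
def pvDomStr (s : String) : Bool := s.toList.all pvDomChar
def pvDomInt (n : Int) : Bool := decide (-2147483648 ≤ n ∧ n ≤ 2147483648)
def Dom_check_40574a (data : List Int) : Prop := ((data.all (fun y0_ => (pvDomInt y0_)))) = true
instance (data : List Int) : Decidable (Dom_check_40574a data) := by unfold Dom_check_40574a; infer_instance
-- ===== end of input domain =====

-- B replaces A's linear fused accumulator loop by a divide-and-conquer binary-split
-- reduction combining (sum, product mod 0xFFFF, xor) of the two halves; objective: alternative.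

-- ===== PORT A =====
-- fused loop over the triple (sum_val, product, xor_val), as in A
def check_40574a (data : List Int) : Bool :=
  let r := data.foldl
    (fun (acc : Int × Int × Int) byte =>
      (acc.1 + byte, PySem.Int.mod (acc.2.1 * byte) 0xFFFF, PySem.Int.bxor acc.2.2 byte))
    (0, 1, 0)
  (PySem.Int.bxor (r.1 + r.2.1) r.2.2) + 0x5555 == 0x61227b3b

-- ===== PORT B =====
-- Source B's reduce3: binary split, combine (s1+s2, p1*p2 % 0xFFFF, x1 ^ x2).
-- (Source B never calls reduce3 on an empty segment; the [] branch is the unreachable default.)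
def pvReduce3 (seg : List Int) : Int × Int × Int :=
  if _h1 : seg.length = 1 then
    (seg.headD 0, PySem.Int.mod (seg.headD 0) 0xFFFF, seg.headD 0)
  else if _h0 : seg.length = 0 then (0, 1, 0)
  else
    let mid := seg.length / 2
    let l := pvReduce3 (seg.take mid)
    let r := pvReduce3 (seg.drop mid)
    (l.1 + r.1, PySem.Int.mod (l.2.1 * r.2.1) 0xFFFF, PySem.Int.bxor l.2.2 r.2.2)
termination_by seg.length
decreasing_by
  · simpa using by omega
  · simp [List.length_drop]; omega

def check_40574a_alt (data : List Int) : Bool :=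
  let t := if data ≠ [] then pvReduce3 data else (0, 1, 0)
  PySem.Int.bxor (t.1 + t.2.1) t.2.2 == 0x61227b3b - 0x5555

-- ===== PRECONDITION & SPEC =====
def Spec_check_40574a (data : List Int) (out : Bool) : Prop := out = check_40574a_alt data
instance (data : List Int) (out : Bool) : Decidable (Spec_check_40574a data out) := by unfold Spec_check_40574a; infer_instance

-- ===== CLAIM (what is proved, stated in full; the proofs are below) =====
def Claim_equal_check_40574a : Prop := ∀ (data : List Int), Dom_check_40574a data → Spec_check_40574a data (check_40574a data)

-- ===== LEMMAS AND PROOFS =====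

-- sign/magnitude encoding of Int, on which bxor acts componentwise
def pvXEnc (a : Int) : Bool × Nat := if 0 ≤ a then (false, a.toNat) else (true, (-a - 1).toNat)
def pvXDec (p : Bool × Nat) : Int := if p.1 then -(p.2 : Int) - 1 else (p.2 : Int)
def pvPXor (p q : Bool × Nat) : Bool × Nat := (xor p.1 q.1, p.2 ^^^ q.2)

theorem pvXEnc_dec (p : Bool × Nat) : pvXEnc (pvXDec p) = p := by
  obtain ⟨s, m⟩ := p
  cases s <;> simp [pvXEnc, pvXDec] <;> omega

theorem pvBxor_eq (a b : Int) : PySem.Int.bxor a b = pvXDec (pvPXor (pvXEnc a) (pvXEnc b)) := by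
  unfold PySem.Int.bxor pvXDec pvPXor pvXEnc
  split_ifs <;> simp_all

theorem pvBxor_assoc (a b c : Int) :
    PySem.Int.bxor (PySem.Int.bxor a b) c = PySem.Int.bxor a (PySem.Int.bxor b c) := by
  simp only [pvBxor_eq, pvXEnc_dec]
  unfold pvPXor
  simp [Nat.xor_assoc]

-- canonical xor of a list
def pvXorAll (l : List Int) : Int := l.foldr PySem.Int.bxor 0

theorem pvXorAll_append (l₁ l₂ : List Int) :
    pvXorAll (l₁ ++ l₂) = PySem.Int.bxor (pvXorAll l₁) (pvXorAll l₂) := by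
  induction l₁ with
  | nil =>
    show pvXorAll l₂ = PySem.Int.bxor 0 (pvXorAll l₂)
    rw [PySem.Int.bxor_comm]; simp
  | cons a t ih => simp [pvXorAll, List.foldr] at ih ⊢; rw [ih, pvBxor_assoc]

theorem pvFoldl_bxor (l : List Int) : ∀ x : Int, l.foldl PySem.Int.bxor x = PySem.Int.bxor x (pvXorAll l) := by
  induction l with
  | nil => intro x; simp [pvXorAll]
  | cons a t ih => intro x; simp only [List.foldl, pvXorAll, List.foldr] at ih ⊢; rw [ih, ← pvBxor_assoc]

theorem pvMod_mul_left (a b : Int) :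
    PySem.Int.mod (PySem.Int.mod a 0xFFFF * b) 0xFFFF = PySem.Int.mod (a * b) 0xFFFF := by
  rw [PySem.Int.mod_eq_emod_of_pos (by norm_num), PySem.Int.mod_eq_emod_of_pos (by norm_num),
      PySem.Int.mod_eq_emod_of_pos (by norm_num)]
  rw [Int.mul_emod, Int.mul_emod a b, Int.emod_emod_of_dvd _ dvd_rfl]

theorem pvMod_mul_right (a b : Int) :
    PySem.Int.mod (a * PySem.Int.mod b 0xFFFF) 0xFFFF = PySem.Int.mod (a * b) 0xFFFF := by
  rw [mul_comm, pvMod_mul_left, mul_comm]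

-- the product accumulator of A's loop, from an already-reduced start
theorem pvFoldl_prod (l : List Int) : ∀ p : Int, l ≠ [] →
    l.foldl (fun p b => PySem.Int.mod (p * b) 0xFFFF) p = PySem.Int.mod (p * l.prod) 0xFFFF := by
  induction l with
  | nil => intro p h; exact absurd rfl h
  | cons a t ih =>
    intro p _
    by_cases ht : t = []
    · subst ht; simp [List.foldl]
    · simp only [List.foldl, List.prod_cons]
      rw [ih _ ht, pvMod_mul_left, mul_assoc]

-- A's fused loop splits into the three reductions, for any start (s, p, x)
theorem pvFoldl_split (data : List Int) :
    ∀ (s p x : Int),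
      data.foldl
        (fun (acc : Int × Int × Int) byte =>
          (acc.1 + byte, PySem.Int.mod (acc.2.1 * byte) 0xFFFF, PySem.Int.bxor acc.2.2 byte))
        (s, p, x)
      = (data.foldl (· + ·) s,
         data.foldl (fun p b => PySem.Int.mod (p * b) 0xFFFF) p,
         data.foldl PySem.Int.bxor x) := by
  induction data with
  | nil => intro s p x; rfl
  | cons b rest ih => intro s p x; simpa using ih (s + b) (PySem.Int.mod (p * b) 0xFFFF) (PySem.Int.bxor x b)

-- B's tree reduction computes (sum, prod % 0xFFFF, xorAll) on every nonempty list
theorem pvReduce3_eq (seg : List Int) (h : seg ≠ []) :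
    pvReduce3 seg = (seg.sum, PySem.Int.mod seg.prod 0xFFFF, pvXorAll seg) := by
  induction seg using pvReduce3.induct with
  | case1 seg h1 =>
    match seg, h1 with
    | [b], _ => simp [pvReduce3, pvXorAll]
  | case2 seg h1 h0 => exact absurd (List.length_eq_zero_iff.mp h0) h
  | case3 seg h1 h0 mid ihl ihr =>
    have hlen : 2 ≤ seg.length := by omega
    have hmid : 1 ≤ seg.length / 2 ∧ seg.length / 2 < seg.length := by omega
    have htl : seg.take (seg.length / 2) ≠ [] := by
      simp [← List.length_pos_iff]; omega
    have hdr : seg.drop (seg.length / 2) ≠ [] := by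
      simp
      omega
    rw [pvReduce3]
    simp only [h1, h0, dite_false]
    rw [ihl htl, ihr hdr]
    have hsplit : seg.take (seg.length / 2) ++ seg.drop (seg.length / 2) = seg :=
      List.take_append_drop _ _
    conv_rhs => rw [← hsplit]
    simp only [List.sum_append, List.prod_append, pvXorAll_append,
      pvMod_mul_left, pvMod_mul_right]
    rfl

-- ===== VERDICT (by name: the statement is the Claim_ definition above) =====
theorem check_40574a_spec : Claim_equal_check_40574a := by
  intro data _
  show check_40574a data = check_40574a_alt data
  by_cases hd : data = []
  · subst hd; decide
  · unfold check_40574a check_40574a_alt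
    rw [pvFoldl_split, pvReduce3_eq data hd]
    simp only [hd, ne_eq, not_false_iff, if_pos]
    rw [pvFoldl_prod data 1 hd, pvFoldl_bxor]
    have hsum : data.foldl (· + ·) 0 = data.sum := by
      simpa using (List.sum_eq_foldl (l := data)).symm
    rw [hsum, one_mul]
    have hx : PySem.Int.bxor 0 (pvXorAll data) = pvXorAll data := by
      rw [PySem.Int.bxor_comm]; simp
    rw [hx]
    have : ∀ a : Int, ((a + 0x5555 == 0x61227b3b) = (a == 0x61227b3b - 0x5555)) := by
      intro a
      by_cases h : a = 0x61227b3b - 0x5555 <;> simp [h] <;> omega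
    rw [this]
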